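-- pv_equiv track=rewrite | github.com/greendolphin7/Algorithm_Practice | 알고리즘/BOJ/BOJ1292.py | sum_number
-- ===== SOURCE A (Python) =====
-- def sum_number(n):
--     answer = 0
--     i = 1
--     while n > 0:
--         for repeat in range(i):         # 더해주는 값을 반복해서 정답에 더하기 위한 for문
--             answer += i                 # 최종 수열합은 더해주고
--             n -= 1                      # 총 반복해야하는 값을 1 빼준다.
--             if n <= 0:                  # 만약 차례차례 모두 더했다면
--                 return answer           # 정답을 리턴해준다.
--         i += 1                          # 정답에 더해야 하는 값을 하나씩 더해준다.
--     return answer                       # 이 리턴이 있는 이유는 A, B가 같은 수인 경우가 있기 때문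
-- ===== SOURCE B (Python) =====
-- def sum_number(n):
--     # walk block by block: block k contributes k copies of k (k*k);
--     # at the end subtract the overshoot of the last block.
--     k = 0
--     t = 0   # number of terms covered by blocks 1..k
--     sq = 0  # sum of all terms in blocks 1..k
--     while t < n:
--         k += 1
--         sq += k * k
--         t += k
--     return sq - k * (t - n)
-- ===== Notes on version B (the rewrite author's own statement) =====
-- stated objective: faster
-- what changed: Replaces the per-term O(n) double loop with an O(sqrt(n)) walk over whole blocks (block k contributes k*k at once), subtracting the overshoot of the last block.
import Mathlib
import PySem

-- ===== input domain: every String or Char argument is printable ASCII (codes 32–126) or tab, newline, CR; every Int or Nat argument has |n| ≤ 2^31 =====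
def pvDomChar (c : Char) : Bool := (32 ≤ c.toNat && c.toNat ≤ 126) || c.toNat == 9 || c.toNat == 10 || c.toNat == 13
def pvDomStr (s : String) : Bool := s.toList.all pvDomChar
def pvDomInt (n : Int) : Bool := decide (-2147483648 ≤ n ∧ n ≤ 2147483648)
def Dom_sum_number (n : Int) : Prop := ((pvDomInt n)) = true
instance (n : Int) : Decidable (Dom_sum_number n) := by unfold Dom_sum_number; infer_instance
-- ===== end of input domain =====

-- B walks block by block (O(sqrt n)) instead of A's per-term loop (O(n)); same return value.

-- ===== PORT A =====
-- inner 'for repeat in range(i)' body: .inl = early return of answer, .inr = (answer, n) after the for loop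
def sumNumInner (c : Nat) (i answer n : Int) : Sum Int (Int × Int) :=
  match c with
  | 0 => .inr (answer, n)
  | c + 1 =>
    let answer := answer + i
    let n := n - 1
    if n ≤ 0 then .inl answer else sumNumInner c i answer n

-- outer 'while n > 0' loop; fuel = initial n.toNat bounds the iteration count (n drops by ≥ 1 per round)
def sumNumLoop (fuel : Nat) (n answer i : Int) : Int :=
  match fuel with
  | 0 => answer
  | fuel + 1 =>
    if 0 < n then
      match sumNumInner i.toNat i answer n with
      | .inl a => a
      | .inr (a, n') => sumNumLoop fuel n' a (i + 1)
    else answer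

def sum_number (n : Int) : Int := sumNumLoop n.toNat n 0 1

-- ===== PORT B =====
-- 'while t < n' block walk; k kept as Nat (it counts blocks, starting at 0)
def sumNumBlocks (n : Int) (k : Nat) (t sq : Int) : Int :=
  if t < n then sumNumBlocks n (k + 1) (t + ((k : Int) + 1)) (sq + ((k : Int) + 1) * ((k : Int) + 1))
  else sq - (k : Int) * (t - n)
termination_by (n - t).toNat
decreasing_by omega

def sum_number_alt (n : Int) : Int := sumNumBlocks n 0 0 0

-- ===== PRECONDITION & SPEC =====
def Spec_sum_number (n : Int) (out : Int) : Prop := out = sum_number_alt n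
instance (n : Int) (out : Int) : Decidable (Spec_sum_number n out) := by unfold Spec_sum_number; infer_instance

-- ===== CLAIM (what is proved, stated in full; the proofs are below) =====
def Claim_equal_sum_number : Prop := ∀ (n : Int), Dom_sum_number n → Spec_sum_number n (sum_number n)

-- ===== LEMMAS AND PROOFS =====

-- the inner for-loop either early-returns (when at most c terms remain) or consumes exactly c terms
theorem sumNumInner_spec (c : Nat) (i a n : Int) (hn : 0 < n) :
    sumNumInner c i a n =
      if n ≤ (c : Int) then .inl (a + n * i) else .inr (a + (c : Int) * i, n - (c : Int)) := by
  induction c generalizing a n with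
  | zero =>
    rw [if_neg (by omega)]
    simp [sumNumInner]
  | succ c ih =>
    show (if n - 1 ≤ 0 then Sum.inl (a + i) else sumNumInner c i (a + i) (n - 1)) = _
    by_cases h : n - 1 ≤ 0
    · have hn1 : n = 1 := by omega
      rw [if_pos h, if_pos (by push_cast; omega)]
      rw [hn1]; ring_nf
    · rw [if_neg h, ih (a + i) (n - 1) (by omega)]
      push_cast
      by_cases h2 : n ≤ (c : Int) + 1
      · rw [if_pos (by omega), if_pos h2]
        ring_nf
      · rw [if_neg (by omega), if_neg h2]
        simp only [Sum.inr.injEq, Prod.mk.injEq]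
        constructor <;> ring

-- A's outer loop state (remaining n - t, accumulated sq, next value k+1) matches B's block walk
theorem sumNumLoop_eq_blocks (fuel : Nat) :
    ∀ (k : Nat) (t sq n : Int), (n - t).toNat ≤ fuel → (t < n ∨ k = 0) →
      sumNumLoop fuel (n - t) sq ((k : Int) + 1) = sumNumBlocks n k t sq := by
  induction fuel with
  | zero =>
    intro k t sq n hf hk
    have hk0 : k = 0 := hk.resolve_left (by omega)
    subst hk0
    rw [sumNumBlocks, if_neg (by omega)]
    simp [sumNumLoop]
  | succ fuel ih =>
    intro k t sq n hf hk
    by_cases h : t < n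
    · rw [sumNumLoop, if_pos (by omega)]
      have htoNat : ((k : Int) + 1).toNat = k + 1 := by omega
      rw [htoNat, sumNumInner_spec _ _ _ _ (by omega)]
      by_cases h2 : n - t ≤ ((k + 1 : Nat) : Int)
      · rw [if_pos h2]
        rw [sumNumBlocks, if_pos h, sumNumBlocks, if_neg (by push_cast at h2 ⊢; omega)]
        push_cast
        ring
      · rw [if_neg h2]
        have : n - t - ((k + 1 : Nat) : Int) = n - (t + ((k : Int) + 1)) := by push_cast; ring
        rw [this]
        rw [sumNumBlocks, if_pos h]
        have := ih (k + 1) (t + ((k : Int) + 1)) (sq + ((k + 1 : Nat) : Int) * ((k : Int) + 1)) n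
          (by push_cast at h2 ⊢; omega) (by push_cast at h2 ⊢; omega)
        push_cast at this ⊢
        convert this using 2
    · have hk0 : k = 0 := hk.resolve_left h
      subst hk0
      rw [sumNumLoop, if_neg (by omega), sumNumBlocks, if_neg h]
      simp

-- ===== VERDICT (by name: the statement is the Claim_ definition above) =====
theorem sum_number_spec : Claim_equal_sum_number := by
  intro n _
  show sum_number n = sum_number_alt n
  have := sumNumLoop_eq_blocks n.toNat 0 0 0 n (by omega) (by
    by_cases h : 0 < n
    · exact Or.inl h
    · exact Or.inr rfl)
  simpa [sum_number, sum_number_alt] using this
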